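-- pv_equiv track=rewrite | github.com/rcbellamy/ParallelRegression | ParallelRegression/__init__.py | has_term
-- ===== SOURCE A (Python) =====
-- def has_term( formula, term ):
--     '''Returns True if `formula` either starts with `term` followed by one of
--     [ )+-~*:] or contains `term` followed by one those characters, preceeded by
--     one of [ (+-~*:].
--     '''
--     before = ' (+-~*:<>'
--     after = ' )+-~*:<>'
--     if formula.startswith( term ):
--         if len( formula ) == len( term ) or formula[len( term )] in after:
--             return( True )
--     for b in before:
--         i = formula.find( b )
--         while i >= 0:
--             if formula[i+1:].startswith( term ):
--                 if len( formula[i+1:] ) == len( term ):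
--                     return( True )
--                 if ( formula[i+len( term )+1] in after ):
--                     return( True )
--             i = formula.find( b, i + 1 )
--     return( False )
-- ===== SOURCE B (Python) =====
-- def has_term(formula, term):
--     '''Single scan over occurrences of `term` itself (via str.find) instead of
--     scanning the formula once per delimiter character.'''
--     before = ' (+-~*:<>'
--     after = ' )+-~*:<>'
--     n = len(formula)
--     m = len(term)
--     pos = 0
--     while pos <= n:
--         p = formula.find(term, pos)
--         if p < 0:
--             return False
--         if (p == 0 or formula[p - 1] in before) and (p + m == n or formula[p + m] in after):
--             return True
--         pos = p + 1
--     return False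
-- ===== Notes on version B (the rewrite author's own statement) =====
-- stated objective: simpler
-- what changed: Instead of scanning the whole formula once per each of the nine 'before' delimiter characters (nested find loops), B scans once over the occurrences of the term itself via formula.find(term, pos) and checks the boundary characters at each occurrence.
import Mathlib
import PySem

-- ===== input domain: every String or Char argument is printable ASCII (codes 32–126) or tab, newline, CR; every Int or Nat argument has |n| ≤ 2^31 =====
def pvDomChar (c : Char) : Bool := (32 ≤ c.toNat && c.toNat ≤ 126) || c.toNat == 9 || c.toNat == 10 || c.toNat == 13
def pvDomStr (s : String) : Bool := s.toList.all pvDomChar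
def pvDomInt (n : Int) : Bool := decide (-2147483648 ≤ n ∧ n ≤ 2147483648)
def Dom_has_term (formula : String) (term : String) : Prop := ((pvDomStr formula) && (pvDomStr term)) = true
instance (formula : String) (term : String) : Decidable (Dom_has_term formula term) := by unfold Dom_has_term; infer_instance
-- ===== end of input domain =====

-- B replaces A's nine whole-string scans (one per 'before' delimiter) by a single scan over
-- occurrences of `term` itself; same return value everywhere (both programs are total).

-- ===== PORT A =====
-- Python's `formula[i] in cs` (total via pyGet?; both programs only evaluate it with the
-- index in range, as the proofs below show — Python never raises here)
def memAt (f : List Char) (i : Int) (cs : List Char) : Bool :=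
  match PySem.List.pyGet? f i with
  | some c => cs.contains c
  | none => false

def beforeChars : List Char := " (+-~*:<>".toList
def afterChars : List Char := " )+-~*:<>".toList

-- A's inner `while i >= 0` loop for one delimiter `b`; fuel `|formula| + 2` always suffices
-- (i strictly increases through occurrence indices of `b`, all < |formula|)
def aLoop (f t : List Char) (b : Char) : Nat → Int → Bool
  | 0, _ => false
  | fuel + 1, i =>
    if 0 ≤ i then
      if PySem.Chars.startswith (PySem.List.slice f (some (i + 1)) none) t then
        if (PySem.List.slice f (some (i + 1)) none).length == t.length then true
        else if memAt f (i + t.length + 1) afterChars then true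
        else aLoop f t b fuel (PySem.Chars.findFrom f [b] (i + 1))
      else aLoop f t b fuel (PySem.Chars.findFrom f [b] (i + 1))
    else false

def has_term (formula : String) (term : String) : Bool :=
  if PySem.Chars.startswith formula.toList term.toList
      && ((formula.toList.length == term.toList.length)
          || memAt formula.toList (term.toList.length : Int) afterChars) then true
  else beforeChars.any fun b =>
    aLoop formula.toList term.toList b (formula.toList.length + 2)
      (PySem.Chars.find formula.toList [b])

-- ===== PORT B =====
-- B's `while pos <= n` loop; `p = formula.find(term, pos)` is spelled inline (same single
-- value); fuel `|formula| + 2` always suffices since pos strictly increases up to n+1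
def bLoop (f t : List Char) : Nat → Nat → Bool
  | 0, _ => false
  | fuel + 1, pos =>
    if pos ≤ f.length then
      if PySem.Chars.findFrom f t (pos : Int) < 0 then false
      else if ((PySem.Chars.findFrom f t (pos : Int) == 0)
                || memAt f (PySem.Chars.findFrom f t (pos : Int) - 1) beforeChars)
              && ((PySem.Chars.findFrom f t (pos : Int) + t.length == (f.length : Int))
                || memAt f (PySem.Chars.findFrom f t (pos : Int) + t.length) afterChars) then true
      else bLoop f t fuel ((PySem.Chars.findFrom f t (pos : Int)).toNat + 1)
    else false

def has_term_alt (formula : String) (term : String) : Bool :=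
  bLoop formula.toList term.toList (formula.toList.length + 2) 0

-- ===== PRECONDITION & SPEC =====
def Spec_has_term (formula : String) (term : String) (out : Bool) : Prop := out = has_term_alt formula term
instance (formula : String) (term : String) (out : Bool) : Decidable (Spec_has_term formula term out) := by unfold Spec_has_term; infer_instance

-- ===== CLAIM (what is proved, stated in full; the proofs are below) =====
def Claim_equal_has_term : Prop := ∀ (formula : String) (term : String), Dom_has_term formula term → Spec_has_term formula term (has_term formula term)

-- ===== LEMMAS AND PROOFS =====

-- an accepted occurrence of `term` at position p (the common characterisation of both programs)
def okp (f t : List Char) (p : Nat) : Prop :=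
  t <+: f.drop p ∧ (p = 0 ∨ memAt f ((p : Int) - 1) beforeChars = true) ∧
    ((p : Int) + t.length = f.length ∨ memAt f ((p : Int) + t.length) afterChars = true)

-- what A's inner loop body accepts at occurrence position p (okp without the `before` conjunct)
def accp (f t : List Char) (p : Nat) : Prop :=
  t <+: f.drop p ∧ ((p : Int) + t.length = f.length ∨ memAt f ((p : Int) + t.length) afterChars = true)

lemma singleton_prefix_drop (l : List Char) (c : Char) (i : Nat) :
    [c] <+: l.drop i ↔ l[i]? = some c := by
  have h0 : ∀ xs : List Char, ([c] <+: xs ↔ xs[0]? = some c) := by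
    intro xs
    cases xs with
    | nil => simp
    | cons a l' => simp [List.cons_prefix_cons, eq_comm]
  rw [h0, List.getElem?_drop, Nat.add_zero]

lemma prefix_drop_infix {t l : List Char} {j : Nat} (h : t <+: l.drop j) : t <:+: l :=
  h.isInfix.trans (List.drop_suffix j l).isInfix

lemma prefix_drop_shift {f t : List Char} {pos p : Nat} (hp : pos ≤ p) (h : t <+: f.drop p) :
    t <+: (f.drop pos).drop (p - pos) := by
  rw [List.drop_drop, show pos + (p - pos) = p by omega]
  exact h

lemma memAt_iff (f : List Char) (i : Int) (cs : List Char) :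
    memAt f i cs = true ↔ ∃ c, PySem.List.pyGet? f i = some c ∧ c ∈ cs := by
  unfold memAt
  cases PySem.List.pyGet? f i
  · simp
  · simp

lemma okp_le_length {f t : List Char} {p : Nat} (h : okp f t p) : p ≤ f.length := by
  obtain ⟨h1, _, h3⟩ := h
  rcases Nat.lt_or_ge f.length p with hgt | hle
  swap
  · exact hle
  exfalso
  have ht : t = [] := by
    have hd : f.drop p = [] := List.drop_eq_nil_of_le (by omega)
    rw [hd] at h1
    exact List.prefix_nil.mp h1
  rcases h3 with h3 | h3
  · rw [ht] at h3
    simp only [List.length_nil, Nat.cast_zero, add_zero] at h3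
    omega
  · rw [memAt_iff] at h3
    obtain ⟨c, hc, -⟩ := h3
    rw [show ((p : Int) + (t.length : Int)) = (((p + t.length : Nat)) : Int) by push_cast; ring,
      PySem.List.pyGet?_natCast] at hc
    obtain ⟨hlt, -⟩ := List.getElem?_eq_some_iff.mp hc
    omega

lemma firstCond_iff (f t : List Char) :
    (PySem.Chars.startswith f t
      && ((f.length == t.length) || memAt f ((t.length : Nat) : Int) afterChars)) = true
      ↔ okp f t 0 := by
  unfold okp
  simp only [Bool.and_eq_true, Bool.or_eq_true, beq_iff_eq, PySem.Chars.startswith_iff,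
    List.drop_zero, Nat.cast_zero, zero_add]
  constructor
  · rintro ⟨h1, h2⟩
    refine ⟨h1, by simp, ?_⟩
    rcases h2 with h | h
    · exact Or.inl (by omega)
    · exact Or.inr h
  · rintro ⟨h1, -, h3⟩
    refine ⟨h1, ?_⟩
    rcases h3 with h | h
    · exact Or.inl (by omega)
    · exact Or.inr h

lemma bLoop_iff (f t : List Char) :
    ∀ fuel pos, pos ≤ f.length + 1 → f.length + 2 ≤ fuel + pos →
      (bLoop f t fuel pos = true ↔ ∃ p, pos ≤ p ∧ okp f t p) := by
  intro fuel
  induction fuel with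
  | zero => intro pos h1 h2; exfalso; omega
  | succ fuel ih =>
    intro pos h1 h2
    by_cases hpos : pos ≤ f.length
    · simp only [bLoop]
      rw [if_pos hpos, PySem.Chars.findFrom_natCast f t pos hpos]
      by_cases hq : PySem.Chars.find (List.drop pos f) t = -1
      · rw [if_pos hq, if_pos (by norm_num : (-1 : Int) < 0)]
        refine iff_of_false (by simp) ?_
        rintro ⟨p, hp, hpre, -, -⟩
        exact (PySem.Chars.find_eq_neg_one_iff _ _).mp hq
          (prefix_drop_infix (prefix_drop_shift hp hpre))
      · rw [if_neg hq]
        have hq0 : 0 ≤ PySem.Chars.find (List.drop pos f) t := by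
          have := PySem.Chars.neg_one_le_find (List.drop pos f) t; omega
        obtain ⟨hqpre, hqmin⟩ := PySem.Chars.find_spec hq0
        have hql := PySem.Chars.find_le_length (List.drop pos f) t
        set q := PySem.Chars.find (List.drop pos f) t with hqdef
        clear_value q
        obtain ⟨P, hPdef⟩ : ∃ P, P = pos + q.toNat := ⟨_, rfl⟩
        have hcast : (pos : Int) + q = (P : Int) := by omega
        rw [hcast]
        have hPpre : t <+: f.drop P := by
          rw [List.drop_drop] at hqpre
          rw [hPdef]
          exact hqpre
        have hPle : P ≤ f.length := by
          rw [List.length_drop] at hql; omega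
        rw [if_neg (by omega : ¬ ((P : Int) < 0))]
        simp only [Bool.and_eq_true, Bool.or_eq_true, beq_iff_eq, Int.natCast_eq_zero]
        by_cases hc : (P = 0 ∨ memAt f ((P : Int) - 1) beforeChars = true) ∧
            ((P : Int) + t.length = (f.length : Int)
              ∨ memAt f ((P : Int) + t.length) afterChars = true)
        · rw [if_pos hc]
          exact iff_of_true rfl ⟨P, by omega, hPpre, hc.1, hc.2⟩
        · rw [if_neg hc, show ((P : Int)).toNat + 1 = P + 1 by omega]
          rw [ih (P + 1) (by omega) (by omega)]
          constructor
          · rintro ⟨p, hp, hok⟩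
            exact ⟨p, by omega, hok⟩
          · rintro ⟨p, hp, hok⟩
            rcases Nat.lt_or_ge p P with hlt | hge
            · exact absurd (prefix_drop_shift hp hok.1) (hqmin (p - pos) (by omega))
            · rcases Nat.eq_or_lt_of_le hge with rfl | hgt
              · exact absurd ⟨hok.2.1, hok.2.2⟩ hc
              · exact ⟨p, by omega, hok⟩
    · simp only [bLoop]
      rw [if_neg hpos]
      refine iff_of_false (by simp) ?_
      rintro ⟨p, hp, hok⟩
      have := okp_le_length hok
      omega

lemma aLoop_iff (f t : List Char) (b : Char) :
    ∀ fuel k, k ≤ f.length → f.length + 1 ≤ fuel + k →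
      (aLoop f t b fuel (PySem.Chars.findFrom f [b] (k : Int)) = true ↔
        ∃ j, k ≤ j ∧ f[j]? = some b ∧ accp f t (j + 1)) := by
  intro fuel
  induction fuel with
  | zero => intro k h1 h2; exfalso; omega
  | succ fuel ih =>
    intro k h1 h2
    rw [PySem.Chars.findFrom_natCast f [b] k h1]
    by_cases hq : PySem.Chars.find (List.drop k f) [b] = -1
    · rw [if_pos hq]
      simp only [aLoop]
      rw [if_neg (by norm_num : ¬ ((0 : Int) ≤ -1))]
      refine iff_of_false (by simp) ?_
      rintro ⟨j, hj, hjb, -⟩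
      exact (PySem.Chars.find_eq_neg_one_iff _ _).mp hq
        (prefix_drop_infix (prefix_drop_shift hj ((singleton_prefix_drop f b j).mpr hjb)))
    · rw [if_neg hq]
      have hq0 : 0 ≤ PySem.Chars.find (List.drop k f) [b] := by
        have := PySem.Chars.neg_one_le_find (List.drop k f) [b]; omega
      obtain ⟨hqpre, hqmin⟩ := PySem.Chars.find_spec hq0
      set q := PySem.Chars.find (List.drop k f) [b] with hqdef
      clear_value q
      obtain ⟨P, hPdef⟩ : ∃ P, P = k + q.toNat := ⟨_, rfl⟩
      have hcast : (k : Int) + q = (P : Int) := by omega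
      rw [hcast]
      have hbP : f[P]? = some b := by
        rw [List.drop_drop] at hqpre
        rw [hPdef]
        exact (singleton_prefix_drop f b (k + q.toNat)).mp hqpre
      have hPlt : P < f.length := by
        obtain ⟨hlt, -⟩ := List.getElem?_eq_some_iff.mp hbP
        exact hlt
      simp only [aLoop]
      rw [if_pos (by omega : (0 : Int) ≤ (P : Int))]
      have hslice : PySem.List.slice f (some ((P : Int) + 1)) none = f.drop (P + 1) := by
        rw [show ((P : Int) + 1) = ((P + 1 : Nat) : Int) by omega,
          PySem.List.slice_from f (by omega)]
        norm_num
      rw [hslice]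
      have hrec : PySem.Chars.findFrom f [b] ((P : Int) + 1)
          = PySem.Chars.findFrom f [b] (((P + 1 : Nat)) : Int) := by
        norm_num
      have hlen_iff : ((f.drop (P + 1)).length == t.length) = true
          ↔ ((P : Int) + 1 + t.length = (f.length : Int)) := by
        rw [beq_iff_eq, List.length_drop]; omega
      have glue : (∃ j, P + 1 ≤ j ∧ f[j]? = some b ∧ accp f t (j + 1)) →
          (∃ j, k ≤ j ∧ f[j]? = some b ∧ accp f t (j + 1)) := by
        rintro ⟨j, hj, hjb, hacc⟩
        exact ⟨j, by omega, hjb, hacc⟩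
      have glue2 : ¬ accp f t (P + 1) →
          (∃ j, k ≤ j ∧ f[j]? = some b ∧ accp f t (j + 1)) →
          (∃ j, P + 1 ≤ j ∧ f[j]? = some b ∧ accp f t (j + 1)) := by
        rintro hna ⟨j, hj, hjb, hacc⟩
        rcases Nat.lt_or_ge j P with hlt | hge
        · exact absurd
            (prefix_drop_shift hj ((singleton_prefix_drop f b j).mpr hjb))
            (hqmin (j - k) (by omega))
        · rcases Nat.eq_or_lt_of_le hge with rfl | hgt
          · exact absurd hacc hna
          · exact ⟨j, by omega, hjb, hacc⟩
      by_cases hsw : t <+: f.drop (P + 1)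
      · rw [if_pos ((PySem.Chars.startswith_iff _ _).mpr hsw)]
        by_cases hlen : ((P : Int) + 1 + t.length = (f.length : Int))
        · rw [if_pos (hlen_iff.mpr hlen)]
          refine iff_of_true rfl ⟨P, by omega, hbP, hsw, Or.inl ?_⟩
          push_cast
          push_cast at hlen
          linarith
        · rw [if_neg (fun h => hlen (hlen_iff.mp h))]
          by_cases hmem : memAt f ((P : Int) + t.length + 1) afterChars = true
          · rw [if_pos hmem]
            refine iff_of_true rfl ⟨P, by omega, hbP, hsw, Or.inr ?_⟩
            rw [show (((P + 1 : Nat)) : Int) + (t.length : Int)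
              = (P : Int) + t.length + 1 by push_cast; ring]
            exact hmem
          · rw [if_neg hmem, hrec, ih (P + 1) (by omega) (by omega)]
            refine ⟨glue, glue2 ?_⟩
            rintro ⟨-, hor⟩
            rcases hor with h | h
            · apply hlen
              push_cast at h ⊢
              linarith
            · apply hmem
              rw [show (P : Int) + (t.length : Int) + 1
                = (((P + 1 : Nat)) : Int) + (t.length : Int) by push_cast; ring]
              exact h
      · rw [if_neg (fun h => hsw ((PySem.Chars.startswith_iff _ _).mp h)),
          hrec, ih (P + 1) (by omega) (by omega)]
        exact ⟨glue, glue2 (fun hacc => hsw hacc.1)⟩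

lemma has_term_true_iff (formula term : String) :
    has_term formula term = true ↔ ∃ p, okp formula.toList term.toList p := by
  unfold has_term
  by_cases h0 : okp formula.toList term.toList 0
  · rw [if_pos ((firstCond_iff _ _).mpr h0)]
    exact iff_of_true rfl ⟨0, h0⟩
  · rw [if_neg (fun h => h0 ((firstCond_iff _ _).mp h)), List.any_eq_true]
    have hfindzero : ∀ b : Char, PySem.Chars.find formula.toList [b]
        = PySem.Chars.findFrom formula.toList [b] (((0 : Nat)) : Int) := by
      intro b
      rw [Nat.cast_zero, PySem.Chars.findFrom_zero]
    constructor
    · rintro ⟨b, hb, hloop⟩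
      rw [hfindzero b, aLoop_iff formula.toList term.toList b _ 0 (by omega) (by omega)] at hloop
      obtain ⟨j, -, hjb, hpre, hor⟩ := hloop
      refine ⟨j + 1, hpre, Or.inr ?_, hor⟩
      rw [show (((j + 1 : Nat)) : Int) - 1 = ((j : Nat) : Int) by push_cast; ring, memAt_iff]
      exact ⟨b, by rw [PySem.List.pyGet?_natCast]; exact hjb, hb⟩
    · rintro ⟨p, hp⟩
      match p with
      | 0 => exact absurd hp h0
      | j + 1 =>
        obtain ⟨hpre, hbor, hafter⟩ := hp
        rcases hbor with h | hmem
        · omega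
        · rw [show (((j + 1 : Nat)) : Int) - 1 = ((j : Nat) : Int) by push_cast; ring,
            memAt_iff] at hmem
          obtain ⟨c, hc, hcmem⟩ := hmem
          rw [PySem.List.pyGet?_natCast] at hc
          refine ⟨c, hcmem, ?_⟩
          rw [hfindzero c, aLoop_iff formula.toList term.toList c _ 0 (by omega) (by omega)]
          exact ⟨j, by omega, hc, hpre, hafter⟩

lemma has_term_alt_true_iff (formula term : String) :
    has_term_alt formula term = true ↔ ∃ p, okp formula.toList term.toList p := by
  unfold has_term_alt
  rw [bLoop_iff formula.toList term.toList _ 0 (by omega) (by omega)]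
  constructor
  · rintro ⟨p, -, h⟩; exact ⟨p, h⟩
  · rintro ⟨p, h⟩; exact ⟨p, Nat.zero_le p, h⟩

-- ===== VERDICT (by name: the statement is the Claim_ definition above) =====
theorem has_term_spec : Claim_equal_has_term := by
  intro formula term _
  unfold Spec_has_term
  have h1 := has_term_true_iff formula term
  have h2 := has_term_alt_true_iff formula term
  cases ha : has_term formula term <;> cases hb : has_term_alt formula term <;> simp_all
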